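-- pv_equiv track=rewrite | github.com/MrBrantCode/unitest_baseline | mut_generate/mist_train_cf/cf_97018/solution.py | find_pair_divisible_by_10
-- ===== SOURCE A (Python) =====
-- def find_pair_divisible_by_10(arr):
--     remainder_dict = {}
--
--     for i, num in enumerate(arr):
--         remainder = num % 10
--         complement = (10 - remainder) % 10
--
--         if complement in remainder_dict:
--             return [remainder_dict[complement][0], i]
--
--         if remainder not in remainder_dict:
--             remainder_dict[remainder] = []
--         remainder_dict[remainder].append(i)
--
--     return []
-- ===== SOURCE B (Python) =====
-- def find_pair_divisible_by_10(arr):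
--     # Pass 1: earliest index of each remainder over the whole array.
--     first_occ = {}
--     for i, num in enumerate(arr):
--         r = num % 10
--         if r not in first_occ:
--             first_occ[r] = i
--     # Pass 2: first i that has a strictly earlier complement occurrence.
--     for i, num in enumerate(arr):
--         c = (10 - num % 10) % 10
--         j = first_occ.get(c)
--         if j is not None and j < i:
--             return [j, i]
--     return []
-- ===== Notes on version B (the rewrite author's own statement) =====
-- stated objective: alternative
-- what changed: Replaces the single interleaved scan that grows a remainder->index-list dict with two separate passes: one pass precomputing the earliest index of every remainder over the whole array, then a scan that returns as soon as the precomputed complement index is strictly smaller than the current index.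
import Mathlib
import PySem

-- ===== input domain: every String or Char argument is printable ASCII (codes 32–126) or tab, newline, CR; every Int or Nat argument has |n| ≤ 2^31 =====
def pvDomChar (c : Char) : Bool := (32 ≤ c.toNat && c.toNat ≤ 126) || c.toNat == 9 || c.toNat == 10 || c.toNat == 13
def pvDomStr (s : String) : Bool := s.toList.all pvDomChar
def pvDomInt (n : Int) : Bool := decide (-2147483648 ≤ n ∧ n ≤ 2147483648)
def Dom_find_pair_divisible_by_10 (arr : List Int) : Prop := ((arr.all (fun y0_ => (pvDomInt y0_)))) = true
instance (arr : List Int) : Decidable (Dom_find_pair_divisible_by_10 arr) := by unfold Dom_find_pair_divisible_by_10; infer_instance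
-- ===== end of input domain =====

-- B replaces A's single interleaved scan (growing a remainder -> index-list dict) with two passes:
-- precompute the earliest index of each remainder, then scan for the first index with an earlier complement.

-- ===== PORT A =====
def aLoop (d : PySem.Dict Int (List Int)) (rest : List (Int × Int)) : List Int :=
  match rest with
  | [] => []
  | (i, num) :: rest =>
    let r := PySem.Int.mod num 10
    let c := PySem.Int.mod (10 - r) 10
    match d.get? c with
    | some l => [(PySem.List.pyGet? l 0).getD 0, i]  -- the stored list is never empty, so [0] never raises; getD 0 is unreachable
    | none =>
      let d := if (d.get? r).isSome then d else d.insert r []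
      aLoop (d.modify r [] (fun l => l ++ [i])) rest

def find_pair_divisible_by_10 (arr : List Int) : List Int :=
  aLoop PySem.Dict.empty (PySem.List.enumerate arr)

-- ===== PORT B =====
def buildFirst (t : PySem.Dict Int Int) (rest : List (Int × Int)) : PySem.Dict Int Int :=
  match rest with
  | [] => t
  | (i, num) :: rest =>
    let r := PySem.Int.mod num 10
    buildFirst (if (t.get? r).isSome then t else t.insert r i) rest

def bLoop (t : PySem.Dict Int Int) (rest : List (Int × Int)) : List Int :=
  match rest with
  | [] => []
  | (i, num) :: rest =>
    let c := PySem.Int.mod (10 - PySem.Int.mod num 10) 10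
    match t.get? c with
    | some j => if j < i then [j, i] else bLoop t rest
    | none => bLoop t rest

def find_pair_divisible_by_10_alt (arr : List Int) : List Int :=
  bLoop (buildFirst PySem.Dict.empty (PySem.List.enumerate arr)) (PySem.List.enumerate arr)

-- ===== PRECONDITION & SPEC =====
def Spec_find_pair_divisible_by_10 (arr : List Int) (out : List Int) : Prop := out = find_pair_divisible_by_10_alt arr
instance (arr : List Int) (out : List Int) : Decidable (Spec_find_pair_divisible_by_10 arr out) := by unfold Spec_find_pair_divisible_by_10; infer_instance

-- ===== CLAIM (what is proved, stated in full; the proofs are below) =====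
def Claim_equal_find_pair_divisible_by_10 : Prop := ∀ (arr : List Int), Dom_find_pair_divisible_by_10 arr → Spec_find_pair_divisible_by_10 arr (find_pair_divisible_by_10 arr)

-- ===== LEMMAS AND PROOFS =====

-- first index (within an enumerated suffix) whose element has remainder r mod 10
def firstIdx (r : Int) : List (Int × Int) → Option Int
  | [] => none
  | (i, num) :: rest => if PySem.Int.mod num 10 = r then some i else firstIdx r rest

lemma buildFirst_get? (l : List (Int × Int)) (t : PySem.Dict Int Int) (r : Int) :
    (buildFirst t l).get? r = ((t.get? r).orElse (fun _ => firstIdx r l)) := by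
  induction l generalizing t with
  | nil => cases h : t.get? r <;> simp [buildFirst, firstIdx, h]
  | cons p rest ih =>
    obtain ⟨i, num⟩ := p
    simp only [buildFirst, firstIdx]
    cases h : t.get? (PySem.Int.mod num 10) with
    | some j =>
      simp only [Option.isSome_some, if_true]
      rw [ih]
      by_cases hr : PySem.Int.mod num 10 = r
      · subst hr
        rw [if_pos rfl, h]
        rfl
      · rw [if_neg hr]
    | none =>
      simp only [Option.isSome_none, Bool.false_eq_true, if_false]
      rw [ih]
      by_cases hr : PySem.Int.mod num 10 = r
      · subst hr
        rw [if_pos rfl, PySem.Dict.get?_insert_self, h]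
        simp [Option.orElse]
      · rw [if_neg hr, PySem.Dict.get?_insert_of_ne _ _ (fun e => hr e.symm)]

lemma firstIdx_ge (r : Int) (ys : List Int) (s j : Int)
    (h : firstIdx r (PySem.List.enumerate ys s) = some j) : s ≤ j := by
  induction ys generalizing s with
  | nil => simp [PySem.List.enumerate_nil, firstIdx] at h
  | cons y ys ihy =>
    rw [PySem.List.enumerate_cons] at h
    simp only [firstIdx] at h
    split at h
    · injection h with h; omega
    · have := ihy (s + 1) h
      omega

-- invariant linking A's growing dict (over the prefix) to B's precomputed table
def LoopInv (d : PySem.Dict Int (List Int)) (t : PySem.Dict Int Int) (s : Int) (xs : List Int) : Prop :=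
  ∀ r : Int, match d.get? r with
    | some l => ∃ j, t.get? r = some j ∧ j < s ∧ PySem.List.pyGet? l 0 = some j
    | none => t.get? r = firstIdx r (PySem.List.enumerate xs s)

lemma pyGet?_append_zero {α : Type} (l : List α) (x j : α)
    (h : PySem.List.pyGet? l 0 = some j) : PySem.List.pyGet? (l ++ [x]) 0 = some j := by
  cases l with
  | nil => simp [PySem.List.pyGet?, PySem.List.pyIdx?] at h
  | cons a l =>
    have hpos : (0:Int) ≤ (l.length : Int) + 1 := by positivity
    simp [PySem.List.pyGet?, PySem.List.pyIdx?, hpos] at h ⊢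
    exact h

lemma loop_eq (xs : List Int) (s : Int) (d : PySem.Dict Int (List Int)) (t : PySem.Dict Int Int)
    (hinv : LoopInv d t s xs) :
    aLoop d (PySem.List.enumerate xs s) = bLoop t (PySem.List.enumerate xs s) := by
  induction xs generalizing s d with
  | nil => simp [PySem.List.enumerate_nil, aLoop, bLoop]
  | cons num rest ih =>
    rw [PySem.List.enumerate_cons]
    simp only [aLoop, bLoop]
    have hc := hinv (PySem.Int.mod (10 - PySem.Int.mod num 10) 10)
    cases hd : d.get? (PySem.Int.mod (10 - PySem.Int.mod num 10) 10) with
    | some l =>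
      rw [hd] at hc
      obtain ⟨j, ht, hj, hget⟩ := hc
      rw [ht]
      simp [hj, hget]
    | none =>
      rw [hd] at hc
      have hguard : ∀ j, t.get? (PySem.Int.mod (10 - PySem.Int.mod num 10) 10) = some j → ¬ j < s := by
        intro j hjeq
        rw [hc, PySem.List.enumerate_cons] at hjeq
        simp only [firstIdx] at hjeq
        intro hlt
        split at hjeq
        · injection hjeq with hjeq; omega
        · have := firstIdx_ge _ rest (s + 1) j hjeq
          omega
      have hstep : aLoop
          ((if (d.get? (PySem.Int.mod num 10)).isSome then d
            else d.insert (PySem.Int.mod num 10) []).modify (PySem.Int.mod num 10) []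
              (fun l => l ++ [s])) (PySem.List.enumerate rest (s + 1))
          = bLoop t (PySem.List.enumerate rest (s + 1)) := by
        apply ih
        intro r
        have hr0 := hinv r
        by_cases hrr : r = PySem.Int.mod num 10
        · subst hrr
          cases hdr : d.get? (PySem.Int.mod num 10) with
          | some l0 =>
            rw [hdr] at hr0
            obtain ⟨j, ht, hj, hget⟩ := hr0
            simp only [Option.isSome_some, if_true, PySem.Dict.modify]
            rw [PySem.Dict.get?_insert_self]
            exact ⟨j, ht, by omega, by
              have hld : d.getD (PySem.Int.mod num 10) [] = l0 := by
                rw [PySem.Dict.getD_eq_get?_getD, hdr]; rfl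
              rw [hld]; exact pyGet?_append_zero _ _ _ hget⟩
          | none =>
            rw [hdr] at hr0
            rw [hr0]
            simp only [Option.isSome_none, Bool.false_eq_true, if_false, PySem.Dict.modify]
            rw [PySem.Dict.get?_insert_self]
            refine ⟨s, ?_, by omega, ?_⟩
            · rw [PySem.List.enumerate_cons]; simp [firstIdx]
            · have he : (d.insert (PySem.Int.mod num 10) []).getD (PySem.Int.mod num 10) [] = [] := by
                rw [PySem.Dict.getD_eq_get?_getD, PySem.Dict.get?_insert_self]; rfl
              rw [he]
              simp [PySem.List.pyGet?, PySem.List.pyIdx?]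
        · have hget' : ((if (d.get? (PySem.Int.mod num 10)).isSome then d
              else d.insert (PySem.Int.mod num 10) []).modify (PySem.Int.mod num 10) []
                (fun l => l ++ [s])).get? r = d.get? r := by
            simp only [PySem.Dict.modify]
            rw [PySem.Dict.get?_insert_of_ne _ _ hrr]
            split
            · rfl
            · exact PySem.Dict.get?_insert_of_ne _ _ hrr
          rw [hget']
          cases hdr : d.get? r with
          | some l0 =>
            rw [hdr] at hr0
            obtain ⟨j, ht, hj, hget⟩ := hr0
            exact ⟨j, ht, by omega, hget⟩
          | none =>
            rw [hdr] at hr0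
            rw [hr0, PySem.List.enumerate_cons]
            simp only [firstIdx]
            rw [if_neg (fun h => hrr h.symm)]
      cases htc : t.get? (PySem.Int.mod (10 - PySem.Int.mod num 10) 10) with
      | some j =>
        simp only [if_neg (hguard j htc)]
        exact hstep
      | none => exact hstep

-- ===== VERDICT (by name: the statement is the Claim_ definition above) =====
theorem find_pair_divisible_by_10_spec : Claim_equal_find_pair_divisible_by_10 := by
  intro arr _
  unfold Spec_find_pair_divisible_by_10 find_pair_divisible_by_10 find_pair_divisible_by_10_alt
  apply loop_eq
  intro r
  rw [PySem.Dict.get?_empty]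
  rw [buildFirst_get?]
  simp [PySem.Dict.get?_empty, Option.orElse]
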